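-- pv_equiv track=rewrite | github.com/Rolphs/TheStockWolf | drugwars/helpers.py | check_company_inp
-- ===== SOURCE A (Python) =====
-- def check_company_inp(a):
--     """Map the user's input to a company name.
--
--     Parameters
--     ----------
--     a : str
--         Player input representing a company. Only the first character is used.
--
--     Returns
--     -------
--     str or None
--         The canonical company name or ``None`` if the input does not match any
--         known company.
--
--     Examples
--     --------
--     >>> check_company_inp('a')
--     'company_a'
--     >>> check_company_inp('x') is None
--     True
--     """
--
--     a = a.lower()
--     companies = {
--         "a": "company_a",
--         "b": "company_b",
--         "c": "company_c",
--         "d": "company_d",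
--         "e": "company_e",
--         "f": "company_f",
--     }
--     if len(a) == 0:
--         return None
--     for k, v in companies.items():
--         if k == a[0]:
--             return v
--     return None
-- ===== SOURCE B (Python) =====
-- def check_company_inp(a):
--     if not a:
--         return None
--     n = ord(a[0])
--     if 65 <= n <= 90:  # fold ASCII upper case arithmetically
--         n += 32
--     if 97 <= n <= 102:  # 'a'..'f'
--         return "company_" + chr(n)
--     return None
-- ===== Notes on version B (the rewrite author's own statement) =====
-- stated objective: simpler
-- what changed: B drops the companies table and any lookup/scan entirely: it works on the code point of the first character only, case-folds it by adding 32 when it lies in the upper-case range, range-checks it against 97..102, and synthesizes the result string from that code point with chr; it never lowercases the rest of the string.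
import Mathlib
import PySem

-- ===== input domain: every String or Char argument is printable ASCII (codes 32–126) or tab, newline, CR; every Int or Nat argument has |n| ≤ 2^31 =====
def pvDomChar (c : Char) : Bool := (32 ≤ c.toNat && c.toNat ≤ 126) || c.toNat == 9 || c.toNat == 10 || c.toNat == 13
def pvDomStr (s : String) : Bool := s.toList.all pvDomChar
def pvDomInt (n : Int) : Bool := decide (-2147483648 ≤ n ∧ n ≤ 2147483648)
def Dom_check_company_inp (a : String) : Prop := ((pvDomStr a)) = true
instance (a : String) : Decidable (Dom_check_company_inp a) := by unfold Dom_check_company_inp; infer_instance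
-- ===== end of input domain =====

-- B drops the companies table and any lookup: it case-folds the first character's code point
-- arithmetically (+32 in the upper-case range), range-checks 97..102 and synthesizes
-- "company_"+chr(n); objective: simpler.

-- ===== PORT A =====
-- the 'for k, v in companies.items(): if k == a[0]: return v' loop
-- (k and a[0] are one-character strings; string equality is code-point list equality, compared here as k.toList == [c])
def pvLoopA (items : List (String × String)) (c : Char) : Option String :=
  match items with
  | [] => none
  | (k, v) :: rest => if k.toList == [c] then some v else pvLoopA rest c

def check_company_inp (a : String) : Option String :=
  let al := PySem.Str.lower a
  let companies : PySem.Dict String String :=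
    PySem.Dict.ofList [("a", "company_a"), ("b", "company_b"), ("c", "company_c"),
                       ("d", "company_d"), ("e", "company_e"), ("f", "company_f")]
  if PySem.Str.len al == 0 then none
  else
    match PySem.Str.pyGet? al 0 with
    | none => none  -- unreachable: al is nonempty, a[0] exists
    | some c => pvLoopA companies.items c

-- ===== PORT B =====
-- ord(a[0]) is the code point; chr(n) is Char.ofNat n (n stays < 0xD800 here, so exact)
def check_company_inp_alt (a : String) : Option String :=
  match a.toList with
  | [] => none
  | c :: _ =>
    let n0 := c.toNat
    let n := if 65 ≤ n0 ∧ n0 ≤ 90 then n0 + 32 else n0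
    if 97 ≤ n ∧ n ≤ 102 then some ("company_" ++ String.ofList [Char.ofNat n]) else none

-- ===== PRECONDITION & SPEC =====
def Spec_check_company_inp (a : String) (out : Option String) : Prop := out = check_company_inp_alt a
instance (a : String) (out : Option String) : Decidable (Spec_check_company_inp a out) := by unfold Spec_check_company_inp; infer_instance

-- ===== CLAIM (what is proved, stated in full; the proofs are below) =====
def Claim_equal_check_company_inp : Prop := ∀ (a : String), Dom_check_company_inp a → Spec_check_company_inp a (check_company_inp a)

-- ===== LEMMAS AND PROOFS =====

theorem pv_toNat_ofNat (n : Nat) (h : n < 1000) : (Char.ofNat n).toNat = n := by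
  unfold Char.ofNat
  split
  · rfl
  · next hv => exact absurd (Or.inl (by omega)) hv

theorem pv_notrange (d k : Char) (hk1 : 97 ≤ k.toNat) (hk2 : k.toNat ≤ 102)
    (h : ¬ (97 ≤ d.toNat ∧ d.toNat ≤ 102)) (he : k = d) : False := by
  subst he; exact h ⟨hk1, hk2⟩

-- A's dict scan returns nothing when the (already case-folded) char is outside 'a'..'f'
theorem pv_loop_of_range (d : Char) (h : ¬ (97 ≤ d.toNat ∧ d.toNat ≤ 102)) :
    pvLoopA [("a", "company_a"), ("b", "company_b"), ("c", "company_c"),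
             ("d", "company_d"), ("e", "company_e"), ("f", "company_f")] d = none := by
  simp only [pvLoopA, beq_iff_eq]
  split_ifs with h1 h2 h3 h4 h5 h6 <;> try rfl
  · exact absurd (by simpa using h1) (fun he => pv_notrange d 'a' (by decide) (by decide) h he)
  · exact absurd (by simpa using h2) (fun he => pv_notrange d 'b' (by decide) (by decide) h he)
  · exact absurd (by simpa using h3) (fun he => pv_notrange d 'c' (by decide) (by decide) h he)
  · exact absurd (by simpa using h4) (fun he => pv_notrange d 'd' (by decide) (by decide) h he)
  · exact absurd (by simpa using h5) (fun he => pv_notrange d 'e' (by decide) (by decide) h he)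
  · exact absurd (by simpa using h6) (fun he => pv_notrange d 'f' (by decide) (by decide) h he)

-- and returns the matching synthesized name when it is inside 'a'..'f'
theorem pv_loop_in_range (d : Char) (hd1 : 97 ≤ d.toNat) (hd2 : d.toNat ≤ 102) :
    pvLoopA [("a", "company_a"), ("b", "company_b"), ("c", "company_c"),
             ("d", "company_d"), ("e", "company_e"), ("f", "company_f")] d
      = some ("company_" ++ String.ofList [Char.ofNat d.toNat]) := by
  have hc : ∀ k : Char, d.toNat = k.toNat → d = k := fun k h => Char.ext (UInt32.toNat_inj.mp h)
  interval_cases h : d.toNat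
  · rw [hc 'a' (by decide)]; decide
  · rw [hc 'b' (by decide)]; decide
  · rw [hc 'c' (by decide)]; decide
  · rw [hc 'd' (by decide)]; decide
  · rw [hc 'e' (by decide)]; decide
  · rw [hc 'f' (by decide)]; decide

theorem pv_lowerChar_upper (c : Char) (hu : 65 ≤ c.toNat ∧ c.toNat ≤ 90) :
    PySem.Chars.lowerChar c = Char.ofNat (c.toNat + 32) := by
  have ha : 'A' ≤ c := UInt32.le_iff_toNat_le.mpr (by simpa using hu.1)
  have hz : c ≤ 'Z' := UInt32.le_iff_toNat_le.mpr (by simpa using hu.2)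
  simp [PySem.Chars.lowerChar, PySem.Chars.isupper, ha, hz]

theorem pv_lowerChar_other (c : Char) (hu : ¬ (65 ≤ c.toNat ∧ c.toNat ≤ 90)) :
    PySem.Chars.lowerChar c = c := by
  have hfalse : PySem.Chars.isupper c = false := by
    simp only [PySem.Chars.isupper, Bool.and_eq_false_iff, decide_eq_false_iff_not]
    by_cases h1 : 65 ≤ c.toNat
    · right; intro hz; exact hu ⟨h1, by have := UInt32.le_iff_toNat_le.mp hz; simpa using this⟩
    · left; intro ha; exact h1 (by have := UInt32.le_iff_toNat_le.mp ha; simpa using this)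
  simp [PySem.Chars.lowerChar, hfalse]

-- the char-level fact: A's dict scan on the case-folded char equals B's arithmetic
theorem pv_char_eq (c : Char) :
    pvLoopA [("a", "company_a"), ("b", "company_b"), ("c", "company_c"),
             ("d", "company_d"), ("e", "company_e"), ("f", "company_f")]
            (PySem.Chars.lowerChar c)
    = (let n0 := c.toNat
       let n := if 65 ≤ n0 ∧ n0 ≤ 90 then n0 + 32 else n0
       if 97 ≤ n ∧ n ≤ 102 then some ("company_" ++ String.ofList [Char.ofNat n]) else none) := by
  by_cases hu : 65 ≤ c.toNat ∧ c.toNat ≤ 90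
  · rw [pv_lowerChar_upper c hu]
    simp only [if_pos hu]
    have htn : (Char.ofNat (c.toNat + 32)).toNat = c.toNat + 32 := pv_toNat_ofNat _ (by omega)
    by_cases hr : 97 ≤ c.toNat + 32 ∧ c.toNat + 32 ≤ 102
    · rw [if_pos hr, pv_loop_in_range _ (by rw [htn]; exact hr.1) (by rw [htn]; exact hr.2), htn]
    · rw [if_neg hr, pv_loop_of_range _ (by rw [htn]; exact hr)]
  · rw [pv_lowerChar_other c hu]
    simp only [if_neg hu]
    by_cases hr : 97 ≤ c.toNat ∧ c.toNat ≤ 102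
    · rw [if_pos hr, pv_loop_in_range _ hr.1 hr.2]
    · rw [if_neg hr, pv_loop_of_range _ hr]

theorem ab_eq (a : String) : check_company_inp a = check_company_inp_alt a := by
  have hitems : (PySem.Dict.ofList [("a", "company_a"), ("b", "company_b"), ("c", "company_c"),
      ("d", "company_d"), ("e", "company_e"), ("f", "company_f")] : PySem.Dict String String).items
      = [("a", "company_a"), ("b", "company_b"), ("c", "company_c"),
         ("d", "company_d"), ("e", "company_e"), ("f", "company_f")] := by decide
  unfold check_company_inp check_company_inp_alt
  cases h : a.toList with
  | nil =>
      simp [PySem.Str.len_eq, PySem.Str.toList_lower, PySem.Chars.lower, h]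
  | cons c rest =>
      simp only [PySem.Str.len_eq, PySem.Str.pyGet?_eq, PySem.Str.toList_lower,
        PySem.Chars.lower, h, List.map_cons,
        PySem.Chars.pyGet?_eq_listPyGet?, PySem.List.pyGet?_zero, hitems]
      norm_num
      rw [if_neg (by omega)]
      exact pv_char_eq c

-- ===== VERDICT (by name: the statement is the Claim_ definition above) =====
theorem check_company_inp_spec : Claim_equal_check_company_inp := by
  intro a _
  unfold Spec_check_company_inp
  exact ab_eq a
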